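-- pv_equiv track=rewrite | github.com/kosirm/resurrexit2 | lang/sl/01_src/parser/chordpro_to_html_arial.py | _extract_comments_and_kapodaster
-- ===== SOURCE A (Python) =====
-- from typing import List, Tuple
--
-- def _extract_comments_and_kapodaster(lines: List[str]) -> Tuple[str, List[str]]:
--     """Extract Kapodaster and comments from ChordPro metadata"""
--     kapodaster = ""
--     comments = []
--
--     i = 0
--     while i < len(lines):
--         line = lines[i].strip()
--
--         if line.startswith('{comment:'):
--             # Extract the comment content
--             comment_content = line[9:]  # Remove '{comment:'
--
--             # Check if it's a Kapodaster line
--             if 'kapodaster' in comment_content.lower() or 'kapo' in comment_content.lower():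
--                 # This is Kapodaster
--                 kapodaster = comment_content.rstrip('}').strip()
--             else:
--                 # This is a regular comment - might be multi-line
--                 if comment_content.endswith('}'):
--                     # Single line comment
--                     comments.append(comment_content.rstrip('}').strip())
--                 else:
--                     # Multi-line comment - collect until we find the closing }
--                     full_comment = comment_content
--                     i += 1
--                     while i < len(lines) and not lines[i].strip().endswith('}'):
--                         full_comment += '\n' + lines[i].strip()
--                         i += 1
--
--                     # Add the final line with closing }
--                     if i < len(lines):
--                         final_line = lines[i].strip()
--                         if final_line.endswith('}'):
--                             full_comment += '\n' + final_line.rstrip('}').strip()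
--
--                     comments.append(full_comment.strip())
--
--         i += 1
--
--     return kapodaster, comments
-- ===== SOURCE B (Python) =====
-- from typing import List, Tuple
--
-- def _extract_comments_and_kapodaster(lines: List[str]) -> Tuple[str, List[str]]:
--     """Extract Kapodaster and comments from ChordPro metadata (flat state-machine pass)."""
--     kapodaster = ""
--     comments = []
--     collecting = False
--     buffer = ""
--     for raw in lines:
--         s = raw.strip()
--         if collecting:
--             if s.endswith('}'):
--                 comments.append((buffer + '\n' + s.rstrip('}').strip()).strip())
--                 collecting = False
--                 buffer = ""
--             else:
--                 buffer += '\n' + s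
--         elif s.startswith('{comment:'):
--             content = s[9:]
--             if 'kapo' in content.lower():
--                 kapodaster = content.rstrip('}').strip()
--             elif content.endswith('}'):
--                 comments.append(content.rstrip('}').strip())
--             else:
--                 collecting = True
--                 buffer = content
--     if collecting:
--         comments.append(buffer.strip())
--     return kapodaster, comments
-- ===== Notes on version B (the rewrite author's own statement) =====
-- stated objective: simpler
-- what changed: Replaced the nested index-advancing while loops with one flat pass over the lines carrying explicit state (a collecting flag and a buffer, flushed at EOF), and collapsed the redundant 'kapodaster'/'kapo' substring test to the single 'kapo' test it is equivalent to.
import Mathlib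
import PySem

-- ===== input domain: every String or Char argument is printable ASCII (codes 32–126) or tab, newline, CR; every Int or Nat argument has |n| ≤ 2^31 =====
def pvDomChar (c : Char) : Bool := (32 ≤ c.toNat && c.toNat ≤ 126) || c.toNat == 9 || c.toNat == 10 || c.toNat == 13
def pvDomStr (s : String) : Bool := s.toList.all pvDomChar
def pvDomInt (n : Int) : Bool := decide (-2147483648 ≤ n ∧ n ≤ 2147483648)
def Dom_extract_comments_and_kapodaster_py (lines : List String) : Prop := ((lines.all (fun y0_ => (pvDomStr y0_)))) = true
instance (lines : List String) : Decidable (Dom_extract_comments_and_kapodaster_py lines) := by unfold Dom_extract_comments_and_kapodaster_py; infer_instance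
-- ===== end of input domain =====

-- B is a single flat pass with an explicit collecting-state instead of A's nested index-advancing loops; same return values.

-- hand port of Python's s.rstrip('}') (drop all trailing '}'); exact: single strip character
def pvRstripRB (s : String) : String :=
  String.ofList ((s.toList.reverse.dropWhile (fun c => c == '}')).reverse)

-- ===== PORT A =====
-- outer while loop (goA_extract) and the inner multi-line collection while loop (collA_extract) of A
mutual
def goA_extract : List String → String → List String → String × List String
  | [], kap, comms => (kap, comms)
  | l :: rest, kap, comms =>
    let line := PySem.Str.strip l
    if PySem.Str.startswith line "{comment:" then
      let content := PySem.Str.slice line (some 9) none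
      if PySem.Str.isIn "kapodaster" (PySem.Str.lower content) || PySem.Str.isIn "kapo" (PySem.Str.lower content) then
        goA_extract rest (PySem.Str.strip (pvRstripRB content)) comms
      else
        if PySem.Str.endswith content "}" then
          goA_extract rest kap (comms ++ [PySem.Str.strip (pvRstripRB content)])
        else
          collA_extract rest content kap comms
    else
      goA_extract rest kap comms
def collA_extract : List String → String → String → List String → String × List String
  | [], full, kap, comms => (kap, comms ++ [PySem.Str.strip full])
  | l :: rest, full, kap, comms =>
    let s := PySem.Str.strip l
    if PySem.Str.endswith s "}" then
      goA_extract rest kap (comms ++ [PySem.Str.strip (full ++ "\n" ++ PySem.Str.strip (pvRstripRB s))])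
    else
      collA_extract rest (full ++ "\n" ++ s) kap comms
end

def extract_comments_and_kapodaster_py (lines : List String) : String × List String :=
  goA_extract lines "" []

-- ===== PORT B =====
-- one flat loop carrying (collecting, buffer) state; unterminated buffer flushed after the loop
def goB_extract : List String → Bool → String → String → List String → String × List String
  | [], collecting, buf, kap, comms =>
    (kap, if collecting then comms ++ [PySem.Str.strip buf] else comms)
  | l :: rest, collecting, buf, kap, comms =>
    let s := PySem.Str.strip l
    if collecting then
      if PySem.Str.endswith s "}" then
        goB_extract rest false "" kap (comms ++ [PySem.Str.strip (buf ++ "\n" ++ PySem.Str.strip (pvRstripRB s))])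
      else
        goB_extract rest true (buf ++ "\n" ++ s) kap comms
    else
      if PySem.Str.startswith s "{comment:" then
        let content := PySem.Str.slice s (some 9) none
        if PySem.Str.isIn "kapo" (PySem.Str.lower content) then
          goB_extract rest false buf (PySem.Str.strip (pvRstripRB content)) comms
        else
          if PySem.Str.endswith content "}" then
            goB_extract rest false buf kap (comms ++ [PySem.Str.strip (pvRstripRB content)])
          else
            goB_extract rest true content kap comms
      else
        goB_extract rest false buf kap comms

def extract_comments_and_kapodaster_py_alt (lines : List String) : String × List String :=
  goB_extract lines false "" "" []

-- ===== PRECONDITION & SPEC =====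
def Spec_extract_comments_and_kapodaster_py (lines : List String) (out : String × List String) : Prop := out = extract_comments_and_kapodaster_py_alt lines
instance (lines : List String) (out : String × List String) : Decidable (Spec_extract_comments_and_kapodaster_py lines out) := by unfold Spec_extract_comments_and_kapodaster_py; infer_instance

-- ===== CLAIM (what is proved, stated in full; the proofs are below) =====
def Claim_equal_extract_comments_and_kapodaster_py : Prop := ∀ (lines : List String), Dom_extract_comments_and_kapodaster_py lines → Spec_extract_comments_and_kapodaster_py lines (extract_comments_and_kapodaster_py lines)

-- ===== LEMMAS AND PROOFS =====

-- A tests 'kapodaster' in low or 'kapo' in low; the first implies the second ('kapo' is a substring)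
lemma kapo_or (low : String) :
    (PySem.Str.isIn "kapodaster" low || PySem.Str.isIn "kapo" low) = PySem.Str.isIn "kapo" low := by
  cases h : PySem.Str.isIn "kapo" low with
  | true => simp
  | false =>
    simp only [Bool.or_false]
    cases h2 : PySem.Str.isIn "kapodaster" low with
    | false => rfl
    | true =>
      have h3 := (PySem.Str.isIn_iff_infix "kapodaster" low).mp h2
      have h4 : "kapo".toList <:+: "kapodaster".toList := by decide
      have h5 : PySem.Str.isIn "kapo" low = true :=
        (PySem.Str.isIn_iff_infix "kapo" low).mpr (h4.trans h3)
      rw [h] at h5; exact absurd h5 (by simp)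

-- the invariant: goB in non-collecting state (for any buffer) tracks goA; in collecting state it tracks collA
lemma goA_goB (lines : List String) :
    (∀ buf kap comms, goA_extract lines kap comms = goB_extract lines false buf kap comms) ∧
    (∀ full kap comms, collA_extract lines full kap comms = goB_extract lines true full kap comms) := by
  induction lines with
  | nil =>
    constructor <;> intros <;> simp [goA_extract, collA_extract, goB_extract]
  | cons l rest ih =>
    obtain ⟨ihA, ihC⟩ := ih
    constructor
    · intro buf kap comms
      simp only [goA_extract, goB_extract, kapo_or, Bool.false_eq_true, if_false]
      split_ifs with h1 h2 h3
      · exact ihA buf _ _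
      · exact ihA buf _ _
      · exact ihC _ _ _
      · exact ihA buf _ _
    · intro full kap comms
      simp only [collA_extract, goB_extract, if_true]
      split_ifs with h1
      · exact ihA "" _ _
      · exact ihC _ _ _

-- ===== VERDICT (by name: the statement is the Claim_ definition above) =====
theorem extract_comments_and_kapodaster_py_spec : Claim_equal_extract_comments_and_kapodaster_py := by
  intro lines _
  unfold Spec_extract_comments_and_kapodaster_py extract_comments_and_kapodaster_py extract_comments_and_kapodaster_py_alt
  exact (goA_goB lines).1 "" "" []
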